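-- pv_equiv track=rewrite | github.com/qiqi-xingyi/KRAS_Sampling | docking_verify/pdbqt.py | _keep_first_model
-- ===== SOURCE A (Python) =====
-- from typing import Iterable, List, Optional, Sequence, Set, Tuple, Union
--
-- def _keep_first_model(lines: List[str]) -> List[str]:
--     """
--     If there are MODEL/ENDMDL blocks, keep only the first MODEL.
--     If no MODEL tags, return unchanged.
--     """
--     has_model = any(l.lstrip().startswith("MODEL") for l in lines)
--     if not has_model:
--         return lines
--
--     kept: List[str] = []
--     model_idx = 0
--     in_first = False
--
--     for l in lines:
--         s = l.lstrip()
--         if s.startswith("MODEL"):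
--             model_idx += 1
--             in_first = (model_idx == 1)
--             continue
--         if s.startswith("ENDMDL"):
--             if model_idx == 1:
--                 in_first = False
--             continue
--         if in_first:
--             kept.append(l)
--
--     return kept
-- ===== SOURCE B (Python) =====
-- from typing import List
--
-- def _keep_first_model(lines: List[str]) -> List[str]:
--     # locate the first MODEL line; if none, return lines unchanged
--     start = None
--     for i, l in enumerate(lines):
--         if l.lstrip().startswith("MODEL"):
--             start = i
--             break
--     if start is None:
--         return lines
--     # take body lines until the next MODEL/ENDMDL boundary
--     out: List[str] = []
--     for l in lines[start + 1:]:
--         if l.lstrip().startswith(("MODEL", "ENDMDL")):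
--             break
--         out.append(l)
--     return out
-- ===== Notes on version B (the rewrite author's own statement) =====
-- stated objective: simpler
-- what changed: Instead of a flag-machine fold (model_idx/in_first) over all lines, B finds the first MODEL line's index and then takes lines until the next MODEL/ENDMDL boundary, stopping early.
import Mathlib
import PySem

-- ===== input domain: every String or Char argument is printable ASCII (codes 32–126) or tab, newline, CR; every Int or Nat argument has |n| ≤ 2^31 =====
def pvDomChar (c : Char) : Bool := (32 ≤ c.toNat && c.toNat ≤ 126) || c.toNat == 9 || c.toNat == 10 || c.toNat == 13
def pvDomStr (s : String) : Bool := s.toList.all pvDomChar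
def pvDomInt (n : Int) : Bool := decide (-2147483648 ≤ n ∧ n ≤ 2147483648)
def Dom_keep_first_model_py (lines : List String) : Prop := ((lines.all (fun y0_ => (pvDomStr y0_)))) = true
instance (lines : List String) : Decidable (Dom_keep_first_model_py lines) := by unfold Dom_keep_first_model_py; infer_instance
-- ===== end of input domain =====

-- B replaces A's flag-machine fold (model_idx/in_first over every line) by locating the
-- first MODEL line and taking lines up to the next MODEL/ENDMDL boundary (objective: simpler).

-- ===== PORT A =====
-- one fold step of A's loop; state = (kept, model_idx, in_first)
def pvStepA (st : List String × Int × Bool) (l : String) : List String × Int × Bool :=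
  let s := PySem.Str.lstrip l
  if PySem.Str.startswith s "MODEL" then (st.1, st.2.1 + 1, st.2.1 + 1 == 1)
  else if PySem.Str.startswith s "ENDMDL" then (st.1, st.2.1, if st.2.1 == 1 then false else st.2.2)
  else if st.2.2 then (st.1 ++ [l], st.2.1, st.2.2) else st

def keep_first_model_py (lines : List String) : List String :=
  if lines.any (fun l => PySem.Str.startswith (PySem.Str.lstrip l) "MODEL") then
    (lines.foldl pvStepA ([], 0, false)).1
  else lines

-- ===== PORT B =====
def pvIsM (l : String) : Bool := PySem.Str.startswith (PySem.Str.lstrip l) "MODEL"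
def pvIsB (l : String) : Bool :=
  PySem.Str.startswith (PySem.Str.lstrip l) "MODEL" || PySem.Str.startswith (PySem.Str.lstrip l) "ENDMDL"

def keep_first_model_py_alt (lines : List String) : List String :=
  match lines.findIdx? pvIsM with
  | none => lines
  | some start => (lines.drop (start + 1)).takeWhile (fun l => !(pvIsB l))

-- ===== PRECONDITION & SPEC =====
def Spec_keep_first_model_py (lines : List String) (out : List String) : Prop := out = keep_first_model_py_alt lines
instance (lines : List String) (out : List String) : Decidable (Spec_keep_first_model_py lines out) := by unfold Spec_keep_first_model_py; infer_instance

-- ===== CLAIM (what is proved, stated in full; the proofs are below) =====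
def Claim_equal_keep_first_model_py : Prop := ∀ (lines : List String), Dom_keep_first_model_py lines → Spec_keep_first_model_py lines (keep_first_model_py lines)

-- ===== LEMMAS AND PROOFS =====

-- once in_first is false and model_idx ≥ 1, A's fold appends nothing more
theorem pv_fold_dead : ∀ (ls acc : List String) (k : Int), 1 ≤ k →
    (ls.foldl pvStepA (acc, k, false)).1 = acc := by
  intro ls
  induction ls with
  | nil => intro acc k _; rfl
  | cons h t ih =>
    intro acc k hk
    simp only [List.foldl_cons, pvStepA]
    by_cases hM : PySem.Str.startswith (PySem.Str.lstrip h) "MODEL" = true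
    · have h1 : ((k + 1 : Int) == 1) = false := by simp; omega
      simp only [hM, if_true, h1]
      exact ih acc (k + 1) (by omega)
    · by_cases hE : PySem.Str.startswith (PySem.Str.lstrip h) "ENDMDL" = true
      · simp only [hM, hE, if_true, ite_self]
        exact ih acc k hk
      · simp only [hM, hE, if_false, Bool.false_eq_true]
        exact ih acc k hk

-- in the first MODEL block A's fold keeps lines up to the next MODEL/ENDMDL boundary
theorem pv_fold_live : ∀ (ls acc : List String),
    (ls.foldl pvStepA (acc, (1 : Int), true)).1 = acc ++ ls.takeWhile (fun l => !(pvIsB l)) := by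
  intro ls
  induction ls with
  | nil => intro acc; simp
  | cons h t ih =>
    intro acc
    simp only [List.foldl_cons, pvStepA, List.takeWhile_cons]
    by_cases hM : PySem.Str.startswith (PySem.Str.lstrip h) "MODEL" = true
    · have hB : (!(pvIsB h)) = false := by
        simp only [pvIsB, hM, Bool.true_or, Bool.not_true]
      have h1 : ((1 + 1 : Int) == 1) = false := by decide
      simp only [hM, if_true, h1, hB, Bool.false_eq_true, if_false, List.append_nil]
      exact pv_fold_dead t acc 2 (by omega)
    · by_cases hE : PySem.Str.startswith (PySem.Str.lstrip h) "ENDMDL" = true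
      · have hB : (!(pvIsB h)) = false := by
          simp only [pvIsB, hE, Bool.or_true, Bool.not_true]
        simp only [hM, hE, if_false, if_true, hB, Bool.false_eq_true, List.append_nil]
        have : ((1 : Int) == 1) = true := by decide
        simp only [this, if_true]
        exact pv_fold_dead t acc 1 (by omega)
      · rw [Bool.not_eq_true] at hM hE
        have hB : (!(pvIsB h)) = true := by
          simp only [pvIsB, hM, hE, Bool.or_self, Bool.not_false]
        simp only [hM, hE, if_false, if_true, hB, Bool.false_eq_true]
        rw [ih (acc ++ [h])]
        simp

-- A's fold from the initial state, characterised by the first MODEL index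
theorem pv_fold_main : ∀ (ls acc : List String),
    (ls.foldl pvStepA (acc, (0 : Int), false)).1 =
      match ls.findIdx? pvIsM with
      | none => acc
      | some i => acc ++ (ls.drop (i + 1)).takeWhile (fun l => !(pvIsB l)) := by
  intro ls
  induction ls with
  | nil => intro acc; rfl
  | cons h t ih =>
    intro acc
    simp only [List.foldl_cons, pvStepA, List.findIdx?_cons]
    by_cases hM : PySem.Str.startswith (PySem.Str.lstrip h) "MODEL" = true
    · have hM' : pvIsM h = true := hM
      have h1 : ((0 + 1 : Int) == 1) = true := by decide
      simp only [hM, hM', if_true, h1, List.drop_succ_cons, List.drop_zero]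
      exact pv_fold_live t acc
    · have hM' : pvIsM h = false := by simpa [pvIsM] using hM
      have hrest : (t.foldl pvStepA (acc, (0 : Int), false)).1 =
          match t.findIdx? pvIsM with
          | none => acc
          | some i => acc ++ (t.drop (i + 1)).takeWhile (fun l => !(pvIsB l)) := ih acc
      by_cases hE : PySem.Str.startswith (PySem.Str.lstrip h) "ENDMDL" = true
      · have h0 : ((0 : Int) == 1) = false := by decide
        simp only [hM, hM', hE, if_false, if_true, h0, Bool.false_eq_true]
        rw [hrest]
        cases t.findIdx? pvIsM <;> simp
      · simp only [hM, hM', hE, if_false, Bool.false_eq_true]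
        rw [hrest]
        cases t.findIdx? pvIsM <;> simp

-- ===== VERDICT (by name: the statement is the Claim_ definition above) =====
theorem keep_first_model_py_spec : Claim_equal_keep_first_model_py := by
  intro lines _
  unfold Spec_keep_first_model_py keep_first_model_py keep_first_model_py_alt
  by_cases hAny : lines.any (fun l => PySem.Str.startswith (PySem.Str.lstrip l) "MODEL") = true
  · simp only [hAny, if_true]
    rw [pv_fold_main lines []]
    have : lines.any pvIsM = true := hAny
    rw [List.any_eq_true] at this
    obtain ⟨x, hx, hpx⟩ := this
    obtain ⟨i, hi⟩ : ∃ i, lines.findIdx? pvIsM = some i := by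
      cases hfi : lines.findIdx? pvIsM with
      | none =>
        rw [List.findIdx?_eq_none_iff] at hfi
        exact absurd (hfi x hx) (by simp [hpx])
      | some i => exact ⟨i, rfl⟩
    rw [hi]
    simp
  · simp only [hAny, if_false, Bool.false_eq_true]
    have : lines.findIdx? pvIsM = none := by
      rw [List.findIdx?_eq_none_iff]
      intro x hx
      have h3 := (List.any_eq_false.mp (Bool.eq_false_iff.mpr hAny)) x hx
      exact Bool.eq_false_iff.mpr h3
    rw [this]
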